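-- pv_equiv track=rewrite | github.com/aaa2ppp/ya-coderun-2024 | p447+/main.py | solve
-- ===== SOURCE A (Python) =====
-- import math
--
-- MODULO = 1_000_000_000
--
-- def solve(a, b):
-- 	if len(a) > len(b):
-- 		a, b = b, a
--
-- 	d = 1
-- 	truncated = False
--
-- 	for i in range(len(a)):
-- 		for j in range(len(b)):
-- 			v = math.gcd(a[i], b[j])
-- 			if v > 1:
-- 				d *= v
-- 				if d >= MODULO:
-- 					d %= MODULO
-- 					truncated = True
-- 					if d == 0:
-- 						return 0, True
-- 				a[i] //= v
-- 				b[j] //= v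
--
-- 	return d, truncated
-- ===== SOURCE B (Python) =====
-- import math
--
-- MODULO = 1_000_000_000
--
-- def solve(a, b):
--     g = math.gcd(math.prod(a), math.prod(b))
--     return g % MODULO, g >= MODULO
-- ===== Notes on version B (the rewrite author's own statement) =====
-- stated objective: simpler
-- what changed: Replaces the O(n*m) nested pairwise gcd-extraction loop (which mutates both lists and tracks the running product mod 1e9 with an overflow flag) by the identity gcd(prod(a), prod(b)) = product of all pairwise-extracted gcd factors: B computes the two products, one gcd, and derives the same value and flag directly; B also does not mutate its arguments.
-- intended difference: When both lists contain a 0, gcd(prod(a),prod(b)) is 0 and B returns (0, False), while A returns an order-dependent partial product of pairwise gcds (e.g. (4, False) on a=[0,2], b=[0,2]) because math.gcd(0,0)=0 is silently skipped by its 'v > 1' guard; B's value is the intended 'gcd of products mod 1e9'. — e.g. on solve([0, 2], [0, 2]): A returns (4, false), B returns (0, false)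
import Mathlib
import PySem

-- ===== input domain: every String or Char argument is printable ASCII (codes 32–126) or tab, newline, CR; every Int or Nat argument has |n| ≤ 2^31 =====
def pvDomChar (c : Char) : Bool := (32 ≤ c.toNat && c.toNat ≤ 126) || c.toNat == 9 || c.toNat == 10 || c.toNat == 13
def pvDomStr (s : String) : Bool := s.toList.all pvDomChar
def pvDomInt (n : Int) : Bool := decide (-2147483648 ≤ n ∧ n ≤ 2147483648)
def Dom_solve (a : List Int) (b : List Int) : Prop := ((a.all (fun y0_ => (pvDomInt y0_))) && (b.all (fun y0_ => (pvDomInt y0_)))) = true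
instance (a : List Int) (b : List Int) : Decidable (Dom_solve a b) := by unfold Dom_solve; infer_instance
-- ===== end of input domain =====

-- B replaces A's nested pairwise gcd-extraction loop by computing gcd(prod(a), prod(b)) once (objective: simpler).
-- NOTE: the Python A mutates its argument lists in place (divides out gcd factors); B does not. The
-- equivalence proved here is about the RETURN value only.

-- ===== PORT A =====
def pvMOD : Int := 1000000000

def solveLoop (a b : List Int) (i j : Nat) (d : Int) (tr : Bool) : Int × Bool :=
  if _hi : i < a.length then
    if _hj : j < b.length then
      let v : Int := Int.gcd (a.getD i 0) (b.getD j 0)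
      if 1 < v then
        let d1 := d * v
        let a' := a.set i (PySem.Int.floordiv (a.getD i 0) v)
        let b' := b.set j (PySem.Int.floordiv (b.getD j 0) v)
        if pvMOD ≤ d1 then
          let d2 := PySem.Int.mod d1 pvMOD
          if d2 = 0 then (0, true)
          else solveLoop a' b' i (j+1) d2 true
        else solveLoop a' b' i (j+1) d1 tr
      else solveLoop a b i (j+1) d tr
    else solveLoop a b (i+1) 0 d tr
  else (d, tr)
termination_by (a.length - i, b.length - j)
decreasing_by all_goals simp_all [List.length_set]; omega

def solve (a : List Int) (b : List Int) : Int × Bool :=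
  if b.length < a.length then solveLoop b a 0 0 1 false   -- `if len(a) > len(b): a, b = b, a`
  else solveLoop a b 0 0 1 false

-- ===== PORT B =====
def solve_alt (a : List Int) (b : List Int) : Int × Bool :=
  let g : Int := Int.gcd (a.foldl (· * ·) 1) (b.foldl (· * ·) 1)   -- math.gcd(math.prod(a), math.prod(b))
  (PySem.Int.mod g pvMOD, decide (pvMOD ≤ g))

-- ===== PRECONDITION & SPEC =====
-- When both lists contain a 0, gcd(prod(a),prod(b)) is 0 and B returns (0, false), while A returns an
-- order-dependent partial product of pairwise gcds (e.g. (4, false) on a=[0,2], b=[0,2]) because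
-- math.gcd(0,0)=0 is silently skipped by its 'v > 1' guard; B's value is the intended
-- 'gcd of products mod 1e9'.
def D_solve (a : List Int) (b : List Int) : Prop := (0:Int) ∈ a ∧ (0:Int) ∈ b
instance (a : List Int) (b : List Int) : Decidable (D_solve a b) := by unfold D_solve; infer_instance

def Spec_solve (a : List Int) (b : List Int) (out : Int × Bool) : Prop := ¬ D_solve a b → out = solve_alt a b
instance (a : List Int) (b : List Int) (out : Int × Bool) : Decidable (Spec_solve a b out) := by unfold Spec_solve; infer_instance

def pvDiffWitness_solve : List Int × List Int := ([0, 2], [0, 2])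
def pvDiffWitnessOut_solve : (Int × Bool) × (Int × Bool) := ((4, false), (0, false))

-- ===== CLAIM (what is proved, stated in full; the proofs are below) =====
def Claim_unchanged_solve : Prop := ∀ (a : List Int) (b : List Int), Dom_solve a b → Spec_solve a b (solve a b)
def Claim_changed_solve : Prop := Dom_solve (pvDiffWitness_solve.1) (pvDiffWitness_solve.2) ∧ D_solve (pvDiffWitness_solve.1) (pvDiffWitness_solve.2) ∧ solve (pvDiffWitness_solve.1) (pvDiffWitness_solve.2) = pvDiffWitnessOut_solve.1 ∧ solve_alt (pvDiffWitness_solve.1) (pvDiffWitness_solve.2) = pvDiffWitnessOut_solve.2 ∧ pvDiffWitnessOut_solve.1 ≠ pvDiffWitnessOut_solve.2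
def Claim_exact_solve : Prop := ∀ (a : List Int) (b : List Int), Dom_solve a b → D_solve a b → solve a b ≠ solve_alt a b

-- ===== LEMMAS AND PROOFS =====

-- Ghost (proof-side) view of A's loop without the mod-10^9 bookkeeping: `rowG x bs` processes one row
-- (one element `x` of `a` against the whole list `bs`), returning (product of extracted gcd factors,
-- final value of x, final list bs); `allG` processes all rows; `restG a b i j` is the product A's loop
-- still extracts from state (a, b, i, j).

def rowG (x : Int) (bs : List Int) : Nat × Int × List Int :=
  match bs with
  | [] => (1, x, [])
  | y :: t =>
    let v : Int := Int.gcd x y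
    if 1 < v then
      let r := rowG (x / v) t
      (Int.gcd x y * r.1, r.2.1, y / v :: r.2.2)
    else
      let r := rowG x t
      (r.1, r.2.1, y :: r.2.2)

def allG : List Int → List Int → Nat × List Int
  | [], bs => (1, bs)
  | x :: t, bs =>
    let r := rowG x bs
    let s := allG t r.2.2
    (r.1 * s.1, s.2)

def restG (a b : List Int) (i j : Nat) : Nat :=
  if i < a.length then
    let r := rowG (a.getD i 0) (b.drop j)
    r.1 * (allG (a.drop (i+1)) (b.take j ++ r.2.2)).1
  else 1

theorem step_gcd (x y P Q : Int) :
    Int.gcd (x * P) (y * Q) =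
      Int.gcd x y * Int.gcd (x / (Int.gcd x y : Int) * P) (y / (Int.gcd x y : Int) * Q) := by
  set g : Int := (Int.gcd x y : Int) with hg
  have hx : g ∣ x := Int.gcd_dvd_left x y
  have hy : g ∣ y := Int.gcd_dvd_right x y
  have e1 : x * P = g * (x / g * P) := by
    rw [← mul_assoc, mul_comm g (x / g), Int.ediv_mul_cancel hx]
  have e2 : y * Q = g * (y / g * Q) := by
    rw [← mul_assoc, mul_comm g (y / g), Int.ediv_mul_cancel hy]
  rw [e1, e2, Int.gcd_mul_left, hg, Int.natAbs_natCast]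

theorem rowG_gcd (bs : List Int) (x P Q : Int) :
    (rowG x bs).1 * Int.gcd ((rowG x bs).2.1 * P) (Q * (rowG x bs).2.2.prod) =
      Int.gcd (x * P) (Q * bs.prod) := by
  induction bs generalizing x Q with
  | nil => simp [rowG]
  | cons y t ih =>
    simp only [rowG]
    split
    · next hv =>
      dsimp only
      have e1 : Q * (y / (Int.gcd x y : Int) * (rowG (x / (Int.gcd x y : Int)) t).2.2.prod)
          = (Q * (y / (Int.gcd x y : Int))) * (rowG (x / (Int.gcd x y : Int)) t).2.2.prod := by ring
      rw [List.prod_cons, e1, Nat.mul_assoc, ih (x / (Int.gcd x y : Int)) (Q * (y / (Int.gcd x y : Int)))]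
      have e2 : Q * (y * t.prod) = y * (Q * t.prod) := by ring
      have e3 : Q * (y / (Int.gcd x y : Int)) * t.prod = y / (Int.gcd x y : Int) * (Q * t.prod) := by ring
      rw [List.prod_cons, e2, e3, step_gcd x y P (Q * t.prod)]
    · next hv =>
      dsimp only
      simp only [List.prod_cons]
      have := ih x (Q * y)
      calc (rowG x t).1 * Int.gcd ((rowG x t).2.1 * P) (Q * (y * (rowG x t).2.2.prod))
          = (rowG x t).1 * Int.gcd ((rowG x t).2.1 * P) ((Q * y) * (rowG x t).2.2.prod) := by
            ring_nf
        _ = Int.gcd (x * P) ((Q * y) * t.prod) := ih x (Q * y)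
        _ = Int.gcd (x * P) (Q * (y * t.prod)) := by ring_nf

theorem rowG_dvd (bs : List Int) (x : Int) : (rowG x bs).2.1 ∣ x := by
  induction bs generalizing x with
  | nil => simp [rowG]
  | cons y t ih =>
    simp only [rowG]
    split
    · next =>
      dsimp only
      exact dvd_trans (ih _) (Int.ediv_dvd_of_dvd (Int.gcd_dvd_left x y))
    · exact ih x

theorem rowG_pos (bs : List Int) (x : Int) : 0 < (rowG x bs).1 := by
  induction bs generalizing x with
  | nil => simp [rowG]
  | cons y t ih =>
    simp only [rowG]
    split
    · next hv =>
      dsimp only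
      have h1 : 0 < Int.gcd x y := by exact_mod_cast lt_trans Int.zero_lt_one hv
      exact Nat.mul_pos h1 (ih _)
    · exact ih x

theorem rowG_ne_zero (bs : List Int) (x : Int) (h : (0:Int) ∉ bs) : (0:Int) ∉ (rowG x bs).2.2 := by
  induction bs generalizing x with
  | nil => simp [rowG]
  | cons y t ih =>
    have hy : y ≠ 0 := by intro e; exact h (by simp [e])
    have ht : (0:Int) ∉ t := fun m => h (List.mem_cons_of_mem _ m)
    simp only [rowG]
    split
    · next hv =>
      dsimp only
      intro m
      rcases List.mem_cons.mp m with e | m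
      · have hd : (Int.gcd x y : Int) ∣ y := Int.gcd_dvd_right x y
        have : y = 0 := by rw [← Int.ediv_mul_cancel hd, ← e, zero_mul]
        exact hy this
      · exact ih _ ht m
    · dsimp only
      intro m
      rcases List.mem_cons.mp m with e | m
      · exact hy e.symm
      · exact ih x ht m

theorem natAbs_one_gcd (w z : Int) (h : z.natAbs = 1) : Int.gcd w z = 1 := by
  rw [Int.gcd_eq_natAbs_gcd_natAbs, h, Nat.gcd_one_right]

theorem rowG_coprime (bs : List Int) (x : Int) (h : x ≠ 0 ∨ (0:Int) ∉ bs) :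
    ∀ z ∈ (rowG x bs).2.2, Int.gcd (rowG x bs).2.1 z = 1 := by
  induction bs generalizing x with
  | nil => simp [rowG]
  | cons y t ih =>
    simp only [rowG]
    split
    · next hv =>
      dsimp only
      set g : Int := (Int.gcd x y : Int) with hg
      have hg0 : (0:Int) < g := by exact_mod_cast lt_trans Int.zero_lt_one hv
      have hgx : g ∣ x := Int.gcd_dvd_left x y
      have hgy : g ∣ y := Int.gcd_dvd_right x y
      intro z hz
      rcases List.mem_cons.mp hz with e | m
      · -- z = y / g : show coprime with the final x-value, which divides x / g
        subst e
        have hdvd : (rowG (x / g) t).2.1 ∣ x / g := rowG_dvd t (x / g)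
        rcases h with hx | hb
        · -- x ≠ 0 : x/g and y/g are coprime
          have hxg : x.natAbs ≠ 0 := by simpa using hx
          have hpos : 0 < Nat.gcd x.natAbs y.natAbs := by
            have : Int.gcd x y ≠ 0 := by
              intro e; rcases Int.gcd_eq_zero_iff.mp e with ⟨e1, _⟩; exact hx e1
            rw [Int.gcd_eq_natAbs_gcd_natAbs] at this; omega
          have hco : Nat.Coprime (x / g).natAbs (y / g).natAbs := by
            rw [Int.natAbs_ediv_of_dvd hgx, Int.natAbs_ediv_of_dvd hgy]
            have : g.natAbs = Nat.gcd x.natAbs y.natAbs := by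
              rw [hg, Int.natAbs_natCast, Int.gcd_eq_natAbs_gcd_natAbs]
            rw [this]
            exact Nat.coprime_div_gcd_div_gcd hpos
          have : Nat.Coprime (rowG (x / g) t).2.1.natAbs (y / g).natAbs :=
            Nat.Coprime.coprime_dvd_left (Int.natAbs_dvd_natAbs.mpr hdvd) hco
          rw [Int.gcd_eq_natAbs_gcd_natAbs]; exact this
        · -- x = 0 possible: then y ≠ 0 and g = |y|, so y / g = ±1
          have hy : y ≠ 0 := by intro e; exact hb (by simp [e])
          by_cases hx : x = 0
          · have : g = (y.natAbs : Int) := by rw [hg, hx, Int.zero_gcd]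
            apply natAbs_one_gcd
            rw [Int.natAbs_ediv_of_dvd hgy, this, Int.natAbs_natCast, Nat.div_self]
            simpa using hy
          · -- same as the x ≠ 0 case
            have hpos : 0 < Nat.gcd x.natAbs y.natAbs := by
              have : Int.gcd x y ≠ 0 := by
                intro e; rcases Int.gcd_eq_zero_iff.mp e with ⟨e1, _⟩; exact hx e1
              rw [Int.gcd_eq_natAbs_gcd_natAbs] at this; omega
            have hco : Nat.Coprime (x / g).natAbs (y / g).natAbs := by
              rw [Int.natAbs_ediv_of_dvd hgx, Int.natAbs_ediv_of_dvd hgy]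
              have : g.natAbs = Nat.gcd x.natAbs y.natAbs := by
                rw [hg, Int.natAbs_natCast, Int.gcd_eq_natAbs_gcd_natAbs]
              rw [this]
              exact Nat.coprime_div_gcd_div_gcd hpos
            have : Nat.Coprime (rowG (x / g) t).2.1.natAbs (y / g).natAbs :=
              Nat.Coprime.coprime_dvd_left (Int.natAbs_dvd_natAbs.mpr hdvd) hco
            rw [Int.gcd_eq_natAbs_gcd_natAbs]; exact this
      · -- z in the tail
        have h' : x / g ≠ 0 ∨ (0:Int) ∉ t := by
          rcases h with hx | hb
          · left
            intro e
            exact hx (by rw [← Int.ediv_mul_cancel hgx, e, zero_mul])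
          · right; exact fun m => hb (List.mem_cons_of_mem _ m)
        exact ih _ h' z m
    · next hv =>
      dsimp only
      intro z hz
      have hdvd : (rowG x t).2.1 ∣ x := rowG_dvd t x
      rcases List.mem_cons.mp hz with e | m
      · subst e
        -- v = 0 is impossible under h; v = 1 gives coprimality directly
        have hv01 : Int.gcd x z = 0 ∨ Int.gcd x z = 1 := by
          have : ¬ (1:Int) < (Int.gcd x z : Int) := hv
          have : Int.gcd x z ≤ 1 := by exact_mod_cast not_lt.mp this
          omega
        rcases hv01 with e0 | e1
        · rcases Int.gcd_eq_zero_iff.mp e0 with ⟨ex, ez⟩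
          exfalso
          rcases h with hx | hb
          · exact hx ex
          · exact hb (by simp [ez])
        · -- gcd x z = 1 and final x-value divides x
          have : Nat.Coprime (rowG x t).2.1.natAbs z.natAbs :=
            Nat.Coprime.coprime_dvd_left (Int.natAbs_dvd_natAbs.mpr hdvd)
              (by rw [Int.gcd_eq_natAbs_gcd_natAbs] at e1; exact e1)
          rw [Int.gcd_eq_natAbs_gcd_natAbs]; exact this
      · have h' : x ≠ 0 ∨ (0:Int) ∉ t := by
          rcases h with hx | hb
          · left; exact hx
          · right; exact fun m => hb (List.mem_cons_of_mem _ m)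
        exact ih x h' z m

theorem coprime_list_prod (l : List Int) (c : Int) (h : ∀ z ∈ l, Int.gcd c z = 1) :
    Int.gcd c l.prod = 1 := by
  induction l with
  | nil => simp
  | cons y t ih =>
    rw [List.prod_cons, Int.gcd_eq_natAbs_gcd_natAbs, Int.natAbs_mul]
    have h1 : Nat.Coprime c.natAbs y.natAbs := by
      have := h y (List.mem_cons_self)
      rw [Int.gcd_eq_natAbs_gcd_natAbs] at this; exact this
    have h2 : Nat.Coprime c.natAbs t.prod.natAbs := by
      have := ih (fun z m => h z (List.mem_cons_of_mem _ m))
      rw [Int.gcd_eq_natAbs_gcd_natAbs] at this; exact this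
    exact Nat.Coprime.mul_right h1 h2

theorem allG_pos (as bs : List Int) : 0 < (allG as bs).1 := by
  induction as generalizing bs with
  | nil => simp [allG]
  | cons x t ih => exact Nat.mul_pos (rowG_pos bs x) (ih _)

theorem allG_gcd (as bs : List Int) (h : (0:Int) ∉ as ∨ (0:Int) ∉ bs) :
    (allG as bs).1 = Int.gcd as.prod bs.prod := by
  induction as generalizing bs with
  | nil => simp [allG]
  | cons x t ih =>
    have hrow : x ≠ 0 ∨ (0:Int) ∉ bs := by
      rcases h with ha | hb
      · left; intro e; exact ha (by simp [e])
      · right; exact hb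
    have h' : (0:Int) ∉ t ∨ (0:Int) ∉ (rowG x bs).2.2 := by
      rcases h with ha | hb
      · left; exact fun m => ha (List.mem_cons_of_mem _ m)
      · right; exact rowG_ne_zero bs x hb
    have hco : Int.gcd (rowG x bs).2.1 (rowG x bs).2.2.prod = 1 :=
      coprime_list_prod _ _ (rowG_coprime bs x hrow)
    have hcancel :
        Int.gcd ((rowG x bs).2.1 * t.prod) (rowG x bs).2.2.prod =
          Int.gcd t.prod (rowG x bs).2.2.prod := by
      rw [Int.gcd_eq_natAbs_gcd_natAbs, Int.natAbs_mul, Int.gcd_eq_natAbs_gcd_natAbs]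
      exact Nat.gcd_mul_right_left_of_gcd_eq_one
        (by rw [Int.gcd_eq_natAbs_gcd_natAbs] at hco; exact hco)
    have hmain := rowG_gcd bs x t.prod 1
    simp only [one_mul] at hmain
    show (rowG x bs).1 * (allG t (rowG x bs).2.2).1 = _
    rw [ih _ h', List.prod_cons, ← hmain, hcancel]

theorem restG_pos (a b : List Int) (i j : Nat) : 0 < restG a b i j := by
  unfold restG
  split
  · exact Nat.mul_pos (rowG_pos _ _) (allG_pos _ _)
  · exact Nat.one_pos

theorem restG_exit (a b : List Int) (i j : Nat) (hi : ¬ i < a.length) : restG a b i j = 1 := by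
  simp [restG, hi]

theorem restG_row_end (a b : List Int) (i j : Nat) (hj : b.length ≤ j) :
    restG a b i j = restG a b (i+1) 0 := by
  unfold restG
  by_cases hi : i < a.length
  · simp only [hi, if_true]
    rw [List.drop_of_length_le hj, List.take_of_length_le hj]
    simp only [rowG, List.append_nil, one_mul]
    by_cases hi1 : i + 1 < a.length
    · simp only [hi1, if_true, List.drop_zero, List.take_zero, List.nil_append]
      rw [List.drop_eq_getElem_cons hi1, List.getD_eq_getElem a 0 hi1]
      rfl
    · simp only [hi1, if_false]
      rw [List.drop_of_length_le (by omega)]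
      simp [allG]
  · simp only [hi, if_false]
    split
    · next h1 => exact absurd (Nat.lt_of_succ_lt h1) hi
    · rfl

theorem restG_skip (a b : List Int) (i j : Nat) (hi : i < a.length) (hj : j < b.length)
    (hv : ¬ (1:Int) < (Int.gcd (a.getD i 0) (b.getD j 0) : Int)) :
    restG a b i j = restG a b i (j+1) := by
  unfold restG
  simp only [hi, if_true]
  rw [List.drop_eq_getElem_cons hj]
  rw [List.getD_eq_getElem b 0 hj] at hv
  simp only [rowG, if_neg hv]
  rw [List.take_succ_eq_append_getElem hj, List.append_assoc]
  rfl

theorem restG_div (a b : List Int) (i j : Nat) (x y : Int) (hi : i < a.length) (hj : j < b.length)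
    (hx : a.getD i 0 = x) (hyy : b[j] = y)
    (hv : (1:Int) < (Int.gcd x y : Int)) :
    restG a b i j =
      Int.gcd x y *
        restG (a.set i (x / (Int.gcd x y : Int)))
              (b.set j (y / (Int.gcd x y : Int))) i (j+1) := by
  unfold restG
  simp only [List.length_set, hi, if_true]
  rw [List.drop_eq_getElem_cons hj, hyy, hx]
  simp only [rowG, if_pos hv]
  have e1 : (a.set i (x / (Int.gcd x y : Int))).getD i 0 = x / (Int.gcd x y : Int) := by
    rw [List.getD_eq_getElem _ 0 (by simpa using hi)]
    simp
  have e2 : (b.set j (y / (Int.gcd x y : Int))).drop (j+1) = b.drop (j+1) :=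
    List.drop_set_of_lt (by omega)
  have e3 : (b.set j (y / (Int.gcd x y : Int))).take (j+1) = b.take j ++ [y / (Int.gcd x y : Int)] := by
    rw [List.set_eq_take_cons_drop _ hj, List.take_append]
    have hlt : (b.take j).length = j := by simp [Nat.min_eq_left (Nat.le_of_lt hj)]
    rw [hlt, List.take_of_length_le (by omega), Nat.add_sub_cancel_left]
    simp
  have e4 : (a.set i (x / (Int.gcd x y : Int))).drop (i+1) = a.drop (i+1) :=
    List.drop_set_of_lt (by omega)
  rw [e1, e2, e3, e4, List.append_assoc]
  dsimp only [List.cons_append, List.nil_append]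
  ring

theorem restG_zero (a b : List Int) : restG a b 0 0 = (allG a b).1 := by
  cases a with
  | nil => simp [restG, allG]
  | cons x t =>
    show restG (x :: t) b 0 0 = ((rowG x b).1 * (allG t (rowG x b).2.2).1)
    simp [restG]

theorem loop_eq (a b : List Int) (i j : Nat) (d : Int) (tr : Bool) (hd : 0 < d) (hdM : d < pvMOD) :
    solveLoop a b i j d tr =
      ((d * (restG a b i j : Int)) % pvMOD,
       tr || decide (pvMOD ≤ d * (restG a b i j : Int))) := by
  have hM : (0:Int) < pvMOD := by norm_num [pvMOD]
  fun_induction solveLoop a b i j d tr with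
  | case1 a b i j d tr hi hj v hv d1 hle d2 heq0 =>
    -- early `return 0, True`: the remaining product is a multiple of pvMOD
    have hbj : b.getD j 0 = b[j] := List.getD_eq_getElem b 0 hj
    rw [restG_div a b i j (a.getD i 0) (b.getD j 0) hi hj rfl hbj.symm hv]
    set g : Nat := Int.gcd (a.getD i 0) (b.getD j 0) with hgdef
    set R : Nat := restG (a.set i (a.getD i 0 / (g:Int))) (b.set j (b.getD j 0 / (g:Int))) i (j+1) with hRdef
    have hRpos : 1 ≤ R := restG_pos _ _ _ _
    have hle' : pvMOD ≤ d * (g:Int) := hle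
    have heq0' : (d * (g:Int)) % pvMOD = 0 := by
      have h := heq0
      change PySem.Int.mod (d * (g:Int)) pvMOD = 0 at h
      rwa [PySem.Int.mod_eq_emod_of_pos hM] at h
    have hfst : d * ((g * R : Nat) : Int) % pvMOD = 0 := by
      push_cast
      rw [← mul_assoc]
      exact Int.emod_eq_zero_of_dvd (Dvd.dvd.mul_right (Int.dvd_of_emod_eq_zero heq0') _)
    have hsnd : pvMOD ≤ d * ((g * R : Nat) : Int) := by
      have hr1 : (1:Int) ≤ (R:Int) := by exact_mod_cast hRpos
      push_cast
      rw [← mul_assoc]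
      nlinarith
    have hsnd' : (tr || decide (pvMOD ≤ d * ((g * R : Nat) : Int))) = true := by
      rw [decide_eq_true hsnd, Bool.or_true]
    rw [hfst, hsnd']
  | case2 a b i j d tr hi hj v hv d1 a' b' hle d2 hne ih =>
    have hv0 : (0:Int) < v := lt_trans Int.zero_lt_one hv
    have hd2 : d2 = (d * v) % pvMOD := PySem.Int.mod_eq_emod_of_pos hM
    have h1 : 0 < d2 := by
      have := Int.emod_nonneg (d * v) (ne_of_gt hM)
      have hne' : d2 ≠ 0 := hne
      omega
    have h2 : d2 < pvMOD := by rw [hd2]; exact Int.emod_lt_of_pos _ hM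
    rw [ih h1 h2]
    have hbj : b.getD j 0 = b[j] := List.getD_eq_getElem b 0 hj
    rw [restG_div a b i j (a.getD i 0) (b.getD j 0) hi hj rfl hbj.symm hv]
    have ha : a' = a.set i (a.getD i 0 / v) := by
      show a.set i (PySem.Int.floordiv (a.getD i 0) v) = _
      rw [PySem.Int.floordiv_eq_ediv_of_pos hv0]
    have hb : b' = b.set j (b.getD j 0 / v) := by
      show b.set j (PySem.Int.floordiv (b.getD j 0) v) = _
      rw [PySem.Int.floordiv_eq_ediv_of_pos hv0]
    rw [ha, hb]
    set g : Nat := Int.gcd (a.getD i 0) (b.getD j 0) with hgdef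
    set R : Nat := restG (a.set i (a.getD i 0 / (g:Int))) (b.set j (b.getD j 0 / (g:Int))) i (j+1) with hRdef
    have hRpos : 1 ≤ R := restG_pos _ _ _ _
    have hle' : pvMOD ≤ d * (g:Int) := hle
    have hfst : d2 * (R:Int) % pvMOD = d * ((g * R : Nat) : Int) % pvMOD := by
      push_cast
      rw [← mul_assoc, Int.mul_emod, Int.mul_emod (d * (g:Int)) (R:Int), hd2,
        Int.emod_emod_of_dvd _ dvd_rfl]
    have hsnd : pvMOD ≤ d * ((g * R : Nat) : Int) := by
      have hr1 : (1:Int) ≤ (R:Int) := by exact_mod_cast hRpos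
      push_cast
      rw [← mul_assoc]
      nlinarith
    have hsnd' : (tr || decide (pvMOD ≤ d * ((g * R : Nat) : Int))) = true := by
      rw [decide_eq_true hsnd, Bool.or_true]
    rw [hfst, hsnd', Bool.true_or]
  | case3 a b i j d tr hi hj v hv d1 a' b' hle ih =>
    have hv0 : (0:Int) < v := lt_trans Int.zero_lt_one hv
    have h1 : 0 < d1 := mul_pos hd hv0
    have h2 : d1 < pvMOD := not_le.mp hle
    rw [ih h1 h2]
    have hbj : b.getD j 0 = b[j] := List.getD_eq_getElem b 0 hj
    rw [restG_div a b i j (a.getD i 0) (b.getD j 0) hi hj rfl hbj.symm hv]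
    have ha : a' = a.set i (a.getD i 0 / v) := by
      show a.set i (PySem.Int.floordiv (a.getD i 0) v) = _
      rw [PySem.Int.floordiv_eq_ediv_of_pos hv0]
    have hb : b' = b.set j (b.getD j 0 / v) := by
      show b.set j (PySem.Int.floordiv (b.getD j 0) v) = _
      rw [PySem.Int.floordiv_eq_ediv_of_pos hv0]
    rw [ha, hb]
    have hassoc : ∀ R : Nat, d1 * (R:Int) = d * ((Int.gcd (a.getD i 0) (b.getD j 0) * R : Nat) : Int) := by
      intro R
      show d * v * (R:Int) = _
      push_cast
      ring
    rw [hassoc]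
  | case4 a b i j d tr hi hj v hv ih =>
    rw [ih hd hdM, restG_skip a b i j hi hj hv]
  | case5 a b i j d tr hi hj ih =>
    rw [ih hd hdM, restG_row_end a b i j (by omega)]
  | case6 a b i j d tr hi =>
    rw [restG_exit a b i j hi]
    have h1 : d * ((1:Nat) : Int) = d := by simp
    rw [h1, Int.emod_eq_of_lt (by omega) hdM]
    have h2 : decide (pvMOD ≤ d) = false := by simp only [decide_eq_false_iff_not, not_le]; omega
    rw [h2, Bool.or_false]


theorem solve_closed (a b : List Int) (h : (0:Int) ∉ a ∨ (0:Int) ∉ b) :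
    solve a b = ((Int.gcd a.prod b.prod : Int) % pvMOD,
                 decide (pvMOD ≤ (Int.gcd a.prod b.prod : Int))) := by
  have hM : (1:Int) < pvMOD := by norm_num [pvMOD]
  unfold solve
  split
  · rw [loop_eq b a 0 0 1 false Int.zero_lt_one hM, restG_zero,
      allG_gcd b a (Or.symm h), Int.gcd_comm]
    simp
  · rw [loop_eq a b 0 0 1 false Int.zero_lt_one hM, restG_zero, allG_gcd a b h]
    simp

theorem solve_alt_eq (a b : List Int) :
    solve_alt a b = ((Int.gcd a.prod b.prod : Int) % pvMOD,
                     decide (pvMOD ≤ (Int.gcd a.prod b.prod : Int))) := by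
  show (PySem.Int.mod (Int.gcd (a.foldl (· * ·) 1) (b.foldl (· * ·) 1) : Int) pvMOD,
    decide (pvMOD ≤ (Int.gcd (a.foldl (· * ·) 1) (b.foldl (· * ·) 1) : Int))) = _
  rw [← List.prod_eq_foldl, ← List.prod_eq_foldl,
    PySem.Int.mod_eq_emod_of_pos (by norm_num [pvMOD])]

theorem solve_never_zero_false (a b : List Int) : solve a b ≠ ((0:Int), false) := by
  have hM : (1:Int) < pvMOD := by norm_num [pvMOD]
  unfold solve
  have key : ∀ x y : List Int, solveLoop x y 0 0 1 false ≠ ((0:Int), false) := by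
    intro x y
    rw [loop_eq x y 0 0 1 false Int.zero_lt_one hM]
    intro heq
    have h1 := congrArg Prod.fst heq
    have h2 := congrArg Prod.snd heq
    simp only [Bool.false_or] at h1 h2
    have hRpos : 1 ≤ restG x y 0 0 := restG_pos x y 0 0
    have hRlt : (restG x y 0 0 : Int) < pvMOD := by
      by_contra hge
      rw [decide_eq_true (by omega : pvMOD ≤ 1 * ((restG x y 0 0 : Nat) : Int))] at h2
      exact absurd h2 (by simp)
    rw [Int.emod_eq_of_lt (by positivity) (by omega)] at h1
    have : (1:Int) ≤ (restG x y 0 0 : Int) := by exact_mod_cast hRpos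
    omega
  split
  · exact key b a
  · exact key a b

-- ===== VERDICT (by name: the statement is the Claim_ definition above) =====
theorem solve_spec : Claim_unchanged_solve := by
  intro a b _ hD
  have h : (0:Int) ∉ a ∨ (0:Int) ∉ b := by
    by_contra hc
    push Not at hc
    exact hD ⟨hc.1, hc.2⟩
  rw [solve_closed a b h, solve_alt_eq]

theorem solve_changed : Claim_changed_solve := by
  unfold Claim_changed_solve
  refine ⟨by decide, by decide, ?_, by decide, by decide⟩
  show solve [0, 2] [0, 2] = ((4:Int), false)
  simp [solve, solveLoop, pvMOD, PySem.Int.floordiv]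

theorem solve_tight : Claim_exact_solve := by
  intro a b _ hD
  have hpa : a.prod = 0 := List.prod_eq_zero hD.1
  have hpb : b.prod = 0 := List.prod_eq_zero hD.2
  have : solve_alt a b = ((0:Int), false) := by
    rw [solve_alt_eq, hpa, hpb]
    norm_num [pvMOD]
  rw [this]
  exact solve_never_zero_false a b
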